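-- pv_equiv track=rewrite | github.com/vterreno/ejercicios-curso-python | Ejercicios/Ejercicio #4 - Diamantes y Arena/lucasPonce.py | contar_diamantes
-- ===== SOURCE A (Python) =====
-- def contar_diamantes(entrada):
--     contador = 0 # Contador para verificar los diamantes "<>" encontrados
--     diamantes = 0 # Contador para sumar la cantidad de diamantes "<>" encontrados
--
--     for caracter in entrada:
--         if caracter == "<":
--             contador += 1 # Si se detecta un "<" (que sería el 'inicio' de un diamante), sumamos 1
--         # Si se detecta un ">" ('cierre' de un diamante), y existe anteriormente un "<" ('inicio' de un diamante), restamos -1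
--         elif caracter == ">" and contador > 0:
--             contador -= 1 # Reestablecemos la variable en 0
--             diamantes += 1 # Indicamos que se encontró un (1) diamante
--
--     return diamantes
-- ===== SOURCE B (Python) =====
-- def contar_diamantes(entrada):
--     # Bracket-reduction strategy: keep only the brackets, then repeatedly
--     # strip adjacent "<>" pairs, accumulating how many were removed.
--     s = "".join(c for c in entrada if c in "<>")
--     total = 0
--     while "<>" in s:
--         total += s.count("<>")
--         s = s.replace("<>", "")
--     return total
-- ===== Notes on version B (the rewrite author's own statement) =====
-- stated objective: alternative
-- what changed: Replaces the single-pass open-bracket counter with a confluent reduction: filter the string to its brackets, then repeatedly count and delete adjacent '<>' pairs until none remain.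
import Mathlib
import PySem

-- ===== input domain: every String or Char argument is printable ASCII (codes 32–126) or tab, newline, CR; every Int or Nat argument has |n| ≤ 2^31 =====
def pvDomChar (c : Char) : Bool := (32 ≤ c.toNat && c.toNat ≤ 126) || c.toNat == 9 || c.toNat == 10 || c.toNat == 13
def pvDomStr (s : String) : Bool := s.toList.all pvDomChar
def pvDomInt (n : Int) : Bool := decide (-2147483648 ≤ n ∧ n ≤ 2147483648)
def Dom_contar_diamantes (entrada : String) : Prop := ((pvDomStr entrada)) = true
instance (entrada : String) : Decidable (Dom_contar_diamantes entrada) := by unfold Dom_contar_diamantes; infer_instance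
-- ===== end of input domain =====

-- B replaces A's one-pass open-bracket counter by a bracket-reduction loop
-- (filter to the brackets, then repeatedly count and delete adjacent "<>" pairs); an alternative algorithm, not faster.

-- ===== PORT A =====
-- the body of A's for-loop: the if/elif over one character, state = (contador, diamantes)
def pvStepA (s : Int × Int) (c : Char) : Int × Int :=
  if c = '<' then (s.1 + 1, s.2)
  else if c = '>' ∧ s.1 > 0 then (s.1 - 1, s.2 + 1)
  else s

def contar_diamantes (entrada : String) : Int :=
  (entrada.toList.foldl pvStepA (0, 0)).2

-- ===== PORT B =====
-- '"<>" in s'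
def pvHasPair : List Char → Bool
  | '<' :: '>' :: _ => true
  | _ :: t => pvHasPair t
  | [] => false

-- 's.count("<>")' (leftmost-first, non-overlapping; "<>" cannot overlap itself)
def pvCnt : List Char → Int
  | '<' :: '>' :: t => pvCnt t + 1
  | _ :: t => pvCnt t
  | [] => 0

-- 's.replace("<>", "")' (remove each leftmost occurrence, continue after it)
def pvRep : List Char → List Char
  | '<' :: '>' :: t => pvRep t
  | c :: t => c :: pvRep t
  | [] => []

-- the 'while "<>" in s:' loop of B, accumulator unfolded into the recursion;
-- the Nat fuel (length + 1 suffices: each replace round strictly shortens the string,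
-- see pvRep_length_lt below) only makes the same computation structurally total
def pvLoopF : Nat → List Char → Int
  | 0, _ => 0
  | f + 1, l => if pvHasPair l then pvCnt l + pvLoopF f (pvRep l) else 0

def contar_diamantes_alt (entrada : String) : Int :=
  pvLoopF ((entrada.toList.filter (fun c => c == '<' || c == '>')).length + 1)
    (entrada.toList.filter (fun c => c == '<' || c == '>'))

-- ===== PRECONDITION & SPEC =====
def Spec_contar_diamantes (entrada : String) (out : Int) : Prop := out = contar_diamantes_alt entrada
instance (entrada : String) (out : Int) : Decidable (Spec_contar_diamantes entrada out) := by unfold Spec_contar_diamantes; infer_instance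

-- ===== CLAIM (what is proved, stated in full; the proofs are below) =====
def Claim_equal_contar_diamantes : Prop := ∀ (entrada : String), Dom_contar_diamantes entrada → Spec_contar_diamantes entrada (contar_diamantes entrada)

-- ===== LEMMAS AND PROOFS =====

-- a replace round strictly shortens the string (justifies the fuel bound)
lemma pvRep_length_le : ∀ l, (pvRep l).length ≤ l.length := by
  intro l
  induction l using pvRep.induct with
  | case1 t ih => simp [pvRep]; omega
  | case2 c t hne ih => rw [pvRep.eq_2 c t hne]; simp; omega
  | case3 => simp [pvRep]

lemma pvRep_length_lt : ∀ l, pvHasPair l = true → (pvRep l).length < l.length := by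
  intro l h
  induction l using pvRep.induct with
  | case1 t ih => simp [pvRep]; have := pvRep_length_le t; omega
  | case2 c t hne ih =>
      rw [pvRep.eq_2 c t hne]
      rw [pvHasPair.eq_2 c t hne] at h
      simpa using ih h
  | case3 => simp [pvHasPair] at h


-- characters other than the two brackets do not change A's state
lemma fold_filter : ∀ (l : List Char) (s : Int × Int),
    List.foldl pvStepA s (List.filter (fun c => c == '<' || c == '>') l) = List.foldl pvStepA s l := by
  intro l
  induction l with
  | nil => intro s; rfl
  | cons h t ih =>
      intro s
      by_cases hb : (h == '<' || h == '>') = true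
      · simp [hb, ih]
      · simp only [Bool.or_eq_true, beq_iff_eq] at hb
        push Not at hb
        have hstep : pvStepA s h = s := by simp [pvStepA, hb.1, hb.2]
        simp [hb.1, hb.2, ih, hstep]

-- diamantes is an accumulator: the fold adds to whatever d it starts from
lemma pvStepA_add (c d : Int) (h : Char) :
    pvStepA (c, d) h = ((pvStepA (c, 0) h).1, d + (pvStepA (c, 0) h).2) := by
  unfold pvStepA; split_ifs <;> simp

lemma fold_add : ∀ (l : List Char) (c d : Int),
    List.foldl pvStepA (c, d) l = ((List.foldl pvStepA (c, 0) l).1, d + (List.foldl pvStepA (c, 0) l).2) := by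
  intro l
  induction l with
  | nil => intro c d; simp
  | cons h t ih =>
      intro c d
      rw [List.foldl_cons, List.foldl_cons, pvStepA_add]
      rw [ih (pvStepA (c, 0) h).1 (d + (pvStepA (c, 0) h).2)]
      conv_rhs => rw [← Prod.mk.eta (p := pvStepA (c, 0) h),
        ih (pvStepA (c, 0) h).1 (pvStepA (c, 0) h).2]
      simp [Prod.ext_iff]; omega

-- one replace round: the fold result loses exactly pvCnt l diamantes (contador stays ≥ 0 throughout)
lemma fold_rep : ∀ (l : List Char) (c d : Int), 0 ≤ c →
    List.foldl pvStepA (c, d) l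
      = ((List.foldl pvStepA (c, d) (pvRep l)).1, (List.foldl pvStepA (c, d) (pvRep l)).2 + pvCnt l) := by
  intro l
  induction l using pvRep.induct with
  | case1 t ih =>
      intro c d hc
      have h1 : pvStepA (c, d) '<' = (c + 1, d) := by simp [pvStepA]
      have h2 : pvStepA (c + 1, d) '>' = (c, d + 1) := by
        unfold pvStepA
        rw [if_neg (by decide), if_pos ⟨rfl, by omega⟩]
        simp
      rw [List.foldl_cons, h1, List.foldl_cons, h2]
      rw [ih c (d + 1) hc]
      rw [show pvRep ('<' :: '>' :: t) = pvRep t from rfl,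
          show pvCnt ('<' :: '>' :: t) = pvCnt t + 1 from rfl]
      rw [fold_add (pvRep t) c (d + 1), fold_add (pvRep t) c d]
      simp [Prod.ext_iff]; omega
  | case2 c t hne ih =>
      intro c0 d hc0
      have hfst : 0 ≤ (pvStepA (c0, d) c).1 := by
        unfold pvStepA; split_ifs with h1 h2 <;> simp <;> omega
      rw [pvRep.eq_2 c t hne, pvCnt.eq_2 c t hne]
      rw [List.foldl_cons, List.foldl_cons]
      rw [← Prod.mk.eta (p := pvStepA (c0, d) c)]
      exact ih (pvStepA (c0, d) c).1 (pvStepA (c0, d) c).2 hfst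
  | case3 => intro c d _; simp [pvRep, pvCnt]

-- over a run of '<' only, diamantes never moves
lemma fold_all_lt : ∀ (l : List Char), (∀ x ∈ l, x = '<') → ∀ (c d : Int),
    (List.foldl pvStepA (c, d) l).2 = d := by
  intro l
  induction l with
  | nil => intro _ c d; rfl
  | cons h t ih =>
      intro hall c d
      have hh : h = '<' := hall h (by simp)
      have ht : ∀ x ∈ t, x = '<' := fun x hx => hall x (by simp [hx])
      simp [List.foldl_cons, hh, pvStepA, ih ht]

-- a pair-free bracket string starting with '<' is all '<' from there on
lemma all_lt_of_noPair : ∀ (t : List Char), (∀ x ∈ t, x = '<' ∨ x = '>') →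
    pvHasPair ('<' :: t) = false → ∀ x ∈ t, x = '<' := by
  intro t
  induction t with
  | nil => intro _ _ x hx; cases hx
  | cons h t' ih =>
      intro hbr hnp x hx
      have hh : h ≠ '>' := by
        intro hgt; subst hgt; simp [pvHasPair] at hnp
      have hhlt : h = '<' := by
        rcases hbr h (by simp) with h1 | h1
        · exact h1
        · exact absurd h1 hh
      subst hhlt
      have hne : ∀ t1, '<' = '<' → ('<' :: t') = '>' :: t1 → False := by
        intro t1 _ he; cases he
      rw [pvHasPair.eq_2 '<' ('<' :: t') hne] at hnp
      rcases List.mem_cons.mp hx with hx | hx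
      · exact hx
      · exact ih (fun y hy => hbr y (by simp [hy])) hnp x hx

-- with contador 0 and no adjacent "<>" in a bracket-only string, no diamond is found
lemma fold_noPair : ∀ (l : List Char), (∀ x ∈ l, x = '<' ∨ x = '>') →
    pvHasPair l = false → ∀ (d : Int), (List.foldl pvStepA (0, d) l).2 = d := by
  intro l
  induction l using pvHasPair.induct with
  | case1 t => intro _ hnp; simp [pvHasPair] at hnp
  | case2 c t hne ih =>
      intro hbr hnp d
      rcases hbr c (by simp) with hc | hc
      · subst hc
        rw [List.foldl_cons, show pvStepA ((0 : Int), d) '<' = (1, d) by simp [pvStepA]]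
        exact fold_all_lt t (all_lt_of_noPair t (fun x hx => hbr x (by simp [hx])) hnp) 1 d
      · subst hc
        rw [List.foldl_cons, show pvStepA ((0 : Int), d) '>' = (0, d) by simp [pvStepA]]
        rw [pvHasPair.eq_2 '>' t hne] at hnp
        exact ih (fun x hx => hbr x (by simp [hx])) hnp d
  | case3 => intro _ _ d; rfl

-- reduction keeps the string bracket-only
lemma pvRep_brackets : ∀ (l : List Char), (∀ x ∈ l, x = '<' ∨ x = '>') →
    ∀ x ∈ pvRep l, x = '<' ∨ x = '>' := by
  intro l
  induction l using pvRep.induct with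
  | case1 t ih =>
      intro hbr x hx
      exact ih (fun y hy => hbr y (by simp [hy])) x (by simpa [pvRep] using hx)
  | case2 c t hne ih =>
      intro hbr x hx
      rw [pvRep.eq_2 c t hne] at hx
      rcases List.mem_cons.mp hx with hx | hx
      · rw [hx]; exact hbr c (by simp)
      · exact ih (fun y hy => hbr y (by simp [hy])) x hx
  | case3 => intro _ x hx; cases hx

-- B's reduction loop computes exactly A's diamond count on a bracket-only string
lemma loop_eq : ∀ (f : Nat) (l : List Char), l.length < f → (∀ x ∈ l, x = '<' ∨ x = '>') →
    pvLoopF f l = (List.foldl pvStepA (0, 0) l).2 := by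
  intro f
  induction f with
  | zero => intro l hl; omega
  | succ f ih =>
      intro l hl hbr
      by_cases hp : pvHasPair l = true
      · rw [pvLoopF, if_pos hp,
          ih (pvRep l) (by have := pvRep_length_lt l hp; omega) (pvRep_brackets l hbr)]
        rw [fold_rep l 0 0 (by omega)]
        omega
      · rw [pvLoopF, if_neg hp]
        exact (fold_noPair l hbr (by simpa using hp) 0).symm

-- ===== VERDICT (by name: the statement is the Claim_ definition above) =====
theorem contar_diamantes_spec : Claim_equal_contar_diamantes := by
  intro entrada _
  unfold Spec_contar_diamantes contar_diamantes contar_diamantes_alt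
  rw [loop_eq _ _ (by omega)]
  · rw [fold_filter]
  · intro x hx
    have := List.of_mem_filter hx
    simpa using this
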